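-- pv_equiv track=rewrite | github.com/DigitalHallucinations/forgewire-fabric | python/forgewire_fabric/hub/server.py | _glob_static_prefix
-- ===== SOURCE A (Python) =====
-- def _glob_static_prefix(glob: str) -> str:
--     """Return the leading static (wildcard-free) prefix of a glob.
--
--     e.g. ``modules/jobs/**`` -> ``modules/jobs/``,
--          ``tests/**/test_x.py`` -> ``tests/``.
--     """
--     norm = glob.replace("\\", "/")
--     cut = len(norm)
--     for ch in ("*", "?", "["):
--         idx = norm.find(ch)
--         if idx != -1 and idx < cut:
--             cut = idx
--     head = norm[:cut]
--     if "/" in head: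
--         head = head.rsplit("/", 1)[0] + "/"
--     return head
-- ===== SOURCE B (Python) =====
-- def _glob_static_prefix(glob: str) -> str:
--     """Return the leading static (wildcard-free) prefix of a glob.
--
--     Segment walk: split the normalized glob on '/', keep whole wildcard-free
--     segments, and stop at the first segment containing a wildcard.
--     """
--     static = []
--     for i, part in enumerate(glob.replace("\\", "/").split("/")):
--         wi = next((j for j, c in enumerate(part) if c in "*?["), None)
--         if wi is not None:
--             if i == 0:
--                 return part[:wi]
--             return "/".join(static) + "/"
--         static.append(part)
--     if len(static) > 1:
--         return "/".join(static[:-1]) + "/"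
--     return static[0]
-- ===== Notes on version B (the rewrite author's own statement) =====
-- stated objective: alternative
-- what changed: A scans the whole glob three times with str.find (once per wildcard character), slices at the minimum index and then rsplits off the trailing partial segment; B splits the normalized glob on the path separator once and walks the segments, accumulating fully wildcard-free segments and stopping at the first segment that contains a wildcard.
import Mathlib
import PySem

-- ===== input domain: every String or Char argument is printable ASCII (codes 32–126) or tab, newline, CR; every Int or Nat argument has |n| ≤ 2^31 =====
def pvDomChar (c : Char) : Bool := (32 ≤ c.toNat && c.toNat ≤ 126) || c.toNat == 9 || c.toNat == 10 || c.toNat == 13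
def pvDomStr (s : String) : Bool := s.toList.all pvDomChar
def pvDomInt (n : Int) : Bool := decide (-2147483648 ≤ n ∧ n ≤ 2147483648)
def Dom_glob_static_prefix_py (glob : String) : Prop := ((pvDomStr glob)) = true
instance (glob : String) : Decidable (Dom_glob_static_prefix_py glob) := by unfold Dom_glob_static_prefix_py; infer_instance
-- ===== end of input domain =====

-- B replaces A's three-pass find + slice + rsplit with a single segment walk over the
-- '/'-split glob (objective: alternative decomposition, same cost).


-- ===== PORT A =====
def glob_static_prefix_py (glob : String) : String :=
  let norm := PySem.Str.replace glob "\\" "/"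
  let cut := ["*", "?", "["].foldl (fun cut ch =>
      let idx := PySem.Str.find norm ch
      if idx ≠ -1 ∧ idx < cut then idx else cut) (PySem.Str.len norm)
  let head := PySem.Str.slice norm none (some cut)
  if PySem.Str.isIn "/" head then
    -- head.rsplit("/", 1)[0] + "/" : rsplit scans from the right for the LAST '/';
    -- ported by hand (PySem has no rsplit): exact here because the guard gives '/' ∈ head
    String.ofList ((head.toList.reverse.dropWhile (· != '/')).tail.reverse ++ ['/'])
  else head


-- ===== PORT B =====
-- `c in "*?["`
def pvWild (c : Char) : Bool := c == '*' || c == '?' || c == '['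


-- the for-loop of Source B: `static` accumulator, `i` the enumerate counter
def pvAltGo (parts : List (List Char)) (i : Nat) (static : List (List Char)) : List Char :=
  match parts with
  | [] =>
    match static with
    | [p] => p
    | _ => PySem.Chars.join ['/'] static.dropLast ++ ['/']
  | part :: rest =>
    match part.findIdx? pvWild with
    | some wi => if i = 0 then part.take wi else PySem.Chars.join ['/'] static ++ ['/']
    | none => pvAltGo rest (i + 1) (static ++ [part])

def glob_static_prefix_py_alt (glob : String) : String :=
  let norm := PySem.Str.replace glob "\\" "/"
  String.ofList (pvAltGo (PySem.Chars.splitOn norm.toList ['/']) 0 [])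


-- ===== PRECONDITION & SPEC =====
def Spec_glob_static_prefix_py (glob : String) (out : String) : Prop := out = glob_static_prefix_py_alt glob
instance (glob : String) (out : String) : Decidable (Spec_glob_static_prefix_py glob out) := by unfold Spec_glob_static_prefix_py; infer_instance

-- ===== CLAIM (what is proved, stated in full; the proofs are below) =====
def Claim_equal_glob_static_prefix_py : Prop := ∀ (glob : String), Dom_glob_static_prefix_py glob → Spec_glob_static_prefix_py glob (glob_static_prefix_py glob)

-- ===== LEMMAS AND PROOFS =====
lemma find_go_singleton (c : Char) : ∀ (s : List Char) (k : Nat),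
    PySem.Chars.find.go [c] s k =
      if c ∈ s then ((k + (s.takeWhile (· != c)).length : Nat) : Int) else -1 := by
  intro s
  induction s with
  | nil => intro k; simp [PySem.Chars.find.go]
  | cons a t ih =>
    intro k
    by_cases h : c = a
    · subst h
      simp [PySem.Chars.find.go, List.isPrefixOf]
    · have hp : [c].isPrefixOf (a :: t) = false := by
        simp [List.isPrefixOf]; exact fun hh => h hh
      have hne : (a != c) = true := by simp [bne]; exact fun hh => h hh.symm
      simp only [PySem.Chars.find.go, hp, Bool.false_eq_true, if_false, ih,
        List.mem_cons, List.takeWhile_cons, hne, if_pos, List.length_cons]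
      split_ifs with h1 h2 h3 <;> first
        | rfl
        | (push_cast; ring)
        | tauto
lemma find_singleton (c : Char) (s : List Char) :
    PySem.Chars.find s [c] =
      if c ∈ s then (((s.takeWhile (· != c)).length : Nat) : Int) else -1 := by
  have := find_go_singleton c s 0
  simpa [PySem.Chars.find] using this


lemma modifyHead_triv {α : Type} (l : List α) : List.modifyHead (fun t => t) l = l := by
  cases l <;> rfl

lemma splitOn_go_spec : ∀ (fuel : Nat) (l : List Char), l.length ≤ fuel →
    ∀ (cur : List Char) (acc : List (List Char)),
    PySem.Chars.splitOn.go ['/'] fuel l cur acc =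
      acc.reverse ++ (l.splitOn '/').modifyHead (fun t => cur.reverse ++ t) := by
  intro fuel
  induction fuel with
  | zero =>
    intro l hl cur acc
    have : l = [] := List.length_eq_zero_iff.mp (Nat.le_zero.mp hl)
    subst this
    simp [PySem.Chars.splitOn.go, List.splitOn]
  | succ n ih =>
    intro l hl cur acc
    match l with
    | [] => simp [PySem.Chars.splitOn.go, List.splitOn]
    | c :: rest =>
      have hrest : rest.length ≤ n := by simpa using hl
      by_cases h : c = '/'
      · subst h
        have hp : List.isPrefixOf ['/'] ('/' :: rest) = true := by simp [List.isPrefixOf]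
        simp only [PySem.Chars.splitOn.go, hp, if_pos, List.length_singleton, List.drop_succ_cons,
          List.drop_zero]
        rw [ih rest hrest [] (cur.reverse :: acc)]
        simp [List.splitOn, List.splitOnP_cons, modifyHead_triv]
      · have hp : List.isPrefixOf ['/'] (c :: rest) = false := by
          simp [List.isPrefixOf]; exact fun hh => h hh.symm
        simp only [PySem.Chars.splitOn.go, hp, Bool.false_eq_true, if_false]
        rw [ih rest hrest (c :: cur) acc]
        have hne : (c == '/') = false := by simpa using h
        simp [List.splitOn, List.splitOnP_cons, hne, List.modifyHead_modifyHead, Function.comp_def]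

lemma splitOn_bridge (s : List Char) :
    PySem.Chars.splitOn s ['/'] = s.splitOn '/' := by
  rw [PySem.Chars.splitOn, splitOn_go_spec (s.length + 1) s (by omega) [] []]
  simp [modifyHead_triv]
lemma take_length_takeWhile (p : Char → Bool) (s : List Char) :
    s.take ((s.takeWhile p).length) = s.takeWhile p := by
  induction s with
  | nil => simp
  | cons a t ih => by_cases h : p a <;> simp [h, ih]

lemma length_takeWhile_le' (p : Char → Bool) (s : List Char) :
    (s.takeWhile p).length ≤ s.length := by
  induction s with
  | nil => simp
  | cons a t ih => by_cases h : p a <;> simp [h] <;> omega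

lemma takeWhile_and_length (p q : Char → Bool) (s : List Char) :
    (s.takeWhile (fun c => p c && q c)).length
      = min (s.takeWhile p).length (s.takeWhile q).length := by
  induction s with
  | nil => simp
  | cons a t ih =>
    by_cases h1 : p a <;> by_cases h2 : q a <;> simp [h1, h2, ih]

lemma cut_eq (s : List Char) :
    (["*", "?", "["].foldl (fun cut ch =>
        let idx := PySem.Chars.find s ch.toList
        if idx ≠ -1 ∧ idx < cut then idx else cut) ((s.length : Int)))
      = ((s.takeWhile (fun c => !pvWild c)).length : Int) := by
  have htw : (s.takeWhile (fun c => !pvWild c)).length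
      = min ((s.takeWhile (· != '*')).length)
          (min ((s.takeWhile (· != '?')).length) ((s.takeWhile (· != '[')).length)) := by
    have h1 : (fun c => !pvWild c) = (fun c => (c != '*') && ((c != '?') && (c != '['))) := by
      funext c; simp [pvWild, bne, Bool.and_assoc]
    rw [h1, takeWhile_and_length, takeWhile_and_length]
  have hle : ∀ c : Char, (s.takeWhile (· != c)).length ≤ s.length :=
    fun c => length_takeWhile_le' _ s
  have hnm : ∀ c : Char, c ∉ s → (s.takeWhile (· != c)).length = s.length := by
    intro c hc
    rw [List.takeWhile_eq_self_iff.mpr]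
    intro x hx; simp [bne]; exact fun he => hc (he ▸ hx)
  simp only [List.foldl_cons, List.foldl_nil]
  rw [show ("*" : String).toList = ['*'] from rfl, show ("?" : String).toList = ['?'] from rfl,
    show ("[" : String).toList = ['['] from rfl]
  rw [find_singleton, find_singleton, find_singleton]
  by_cases h1 : '*' ∈ s <;> by_cases h2 : '?' ∈ s <;> by_cases h3 : '[' ∈ s <;>
    · simp only [h1, h2, h3, if_true, if_false, reduceIte, not_false_iff]
      have a1 := hle '*'; have a2 := hle '?'; have a3 := hle '['
      try have b1 := hnm '*' h1
      try have b2 := hnm '?' h2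
      try have b3 := hnm '[' h3
      split_ifs <;> omega

-- the prefix of h up to and including its LAST '/' ([] if there is none)
def pvR (h : List Char) : List Char := (h.reverse.dropWhile (· != '/')).reverse

lemma pvR_append (a y : List Char) : pvR (a ++ '/' :: y) = a ++ '/' :: pvR y := by
  unfold pvR
  rw [List.reverse_append, List.reverse_cons, List.append_assoc, List.dropWhile_append]
  by_cases h : '/' ∈ y
  · have hne : y.reverse.dropWhile (· != '/') ≠ [] := by
      rw [Ne, List.dropWhile_eq_nil_iff]
      push Not
      exact ⟨'/', by simpa using h, by simp⟩
    simp only [List.isEmpty_iff, hne, if_false]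
    rw [List.reverse_append]
    simp
  · have hnil : y.reverse.dropWhile (· != '/') = [] := by
      rw [List.dropWhile_eq_nil_iff]
      intro x hx; simp [bne]; intro he; exact h (by simpa [he] using hx)
    simp only [hnil, List.isEmpty_nil, if_true]
    rw [show ['/'] ++ a.reverse = '/' :: a.reverse from rfl, List.dropWhile_cons]
    simp [hnil]

lemma findIdx?_none_takeWhile (p : Char → Bool) (l : List Char)
    (h : l.findIdx? p = none) : l.takeWhile (fun c => !p c) = l := by
  rw [List.takeWhile_eq_self_iff]
  intro x hx
  simpa using List.findIdx?_eq_none_iff.mp h x hx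

lemma findIdx?_some_take (p : Char → Bool) : ∀ (l : List Char) (w : Nat),
    l.findIdx? p = some w →
    l.take w = l.takeWhile (fun c => !p c) ∧ ∃ c ∈ l, p c := by
  intro l
  induction l with
  | nil => intro w h; exact absurd h (by simp)
  | cons a t ih =>
    intro w h
    rw [List.findIdx?_cons] at h
    by_cases ha : p a
    · simp only [ha, if_true, Option.some_inj] at h
      subst h
      simp [ha]
    · simp only [ha, Bool.false_eq_true, if_false, Option.map_eq_some_iff] at h
      obtain ⟨w', hw', rfl⟩ := h
      obtain ⟨h1, c, hc, hpc⟩ := ih w' hw'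
      exact ⟨by simp [ha, h1], c, by simp [hc], hpc⟩

lemma join_append_singleton (a : List Char) : ∀ (static : List (List Char)), static ≠ [] →
    PySem.Chars.join ['/'] (static ++ [a]) = PySem.Chars.join ['/'] static ++ '/' :: a := by
  intro static
  induction static with
  | nil => intro h; exact absurd rfl h
  | cons x t ih =>
    intro _
    match t with
    | [] => simp [PySem.Chars.join_cons_cons, PySem.Chars.join_singleton]
    | y :: t' =>
      rw [List.cons_append, show (y :: t') ++ [a] = y :: (t' ++ [a]) from rfl]
      rw [PySem.Chars.join_cons_cons, show y :: (t' ++ [a]) = (y :: t') ++ [a] from rfl,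
        ih (by simp), PySem.Chars.join_cons_cons]
      simp [List.append_assoc]

lemma splitOn_no_sep (s : List Char) (h : '/' ∉ s) : s.splitOn '/' = [s] := by
  induction s with
  | nil => simp [List.splitOn]
  | cons a t ih =>
    have ha : ¬ a = '/' := fun he => h (by simp [he])
    have ht := ih (fun hm => h (List.mem_cons_of_mem _ hm))
    simp only [List.splitOn] at ht ⊢
    rw [List.splitOnP_cons]
    simp [ha, ht]

lemma splitOn_sep_append (a b : List Char) (h : '/' ∉ a) :
    (a ++ '/' :: b).splitOn '/' = a :: b.splitOn '/' := by
  induction a with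
  | nil => simp [List.splitOn, List.splitOnP_cons]
  | cons x t ih =>
    have hx : ¬ x = '/' := fun he => h (by simp [he])
    have ht := ih (fun hm => h (List.mem_cons_of_mem _ hm))
    simp only [List.splitOn] at ht ⊢
    rw [List.cons_append, List.splitOnP_cons]
    simp [hx, ht]

lemma pvR_of_not_mem (h : List Char) (hn : '/' ∉ h) : pvR h = [] := by
  unfold pvR
  have : h.reverse.dropWhile (· != '/') = [] := by
    rw [List.dropWhile_eq_nil_iff]
    intro x hx; simp [bne]; intro he; exact hn (by simpa [he] using hx)
  simp [this]

lemma not_mem_takeWhile {c : Char} (p : Char → Bool) (s : List Char) (h : c ∉ s) :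
    c ∉ s.takeWhile p :=
  fun hm => h ((List.takeWhile_prefix p).subset hm)

lemma takeWhile_nw_append_clean (a b : List Char) (ha : List.findIdx? pvWild a = none) :
    (a ++ '/' :: b).takeWhile (fun c => !pvWild c)
      = a ++ '/' :: b.takeWhile (fun c => !pvWild c) := by
  have h1 : a.takeWhile (fun c => !pvWild c) = a := findIdx?_none_takeWhile _ _ ha
  rw [List.takeWhile_append, h1]
  simp only [if_pos rfl, List.takeWhile_cons]
  have : (!pvWild '/') = true := by decide
  simp [this]

lemma takeWhile_nw_append_wild (a b : List Char) (w : Nat)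
    (ha : List.findIdx? pvWild a = some w) :
    (a ++ '/' :: b).takeWhile (fun c => !pvWild c) = a.takeWhile (fun c => !pvWild c) := by
  obtain ⟨_, c, hc, hpc⟩ := findIdx?_some_take pvWild a w ha
  have hne : a.takeWhile (fun c => !pvWild c) ≠ a := by
    intro he
    have := List.takeWhile_eq_self_iff.mp he c hc
    simp [hpc] at this
  rw [List.takeWhile_append]
  split_ifs with hl
  · exact absurd ((List.takeWhile_prefix _).eq_of_length hl) hne
  · rfl

lemma sep_decomp (s : List Char) (h : '/' ∈ s) :
    ∃ a b, s = a ++ '/' :: b ∧ '/' ∉ a := by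
  have hsp := List.takeWhile_append_dropWhile (p := (· != '/')) (l := s)
  have hne : s.dropWhile (· != '/') ≠ [] := by
    rw [Ne, List.dropWhile_eq_nil_iff]
    push Not
    exact ⟨'/', h, by simp⟩
  obtain ⟨hd, tl, he⟩ := List.exists_cons_of_ne_nil hne
  have hhd : hd = '/' := by
    have := List.head_dropWhile_not (· != '/') hne
    simpa [he] using this
  refine ⟨s.takeWhile (· != '/'), tl, ?_, ?_⟩
  · conv_lhs => rw [← hsp, he, hhd]
  · intro hm
    have := List.mem_takeWhile_imp hm
    simp at this

lemma altGo_G : ∀ (n : Nat) (b : List Char), b.length ≤ n → ∀ (i : Nat) (static : List (List Char)),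
    static ≠ [] → i ≠ 0 →
    pvAltGo (b.splitOn '/') i static
      = PySem.Chars.join ['/'] static ++ '/' :: pvR (b.takeWhile (fun c => !pvWild c)) := by
  intro n
  induction n with
  | zero =>
    intro b hb i static hst hi
    have : b = [] := List.length_eq_zero_iff.mp (Nat.le_zero.mp hb)
    subst this
    obtain ⟨x, t, rfl⟩ := List.exists_cons_of_ne_nil hst
    rw [splitOn_no_sep [] (by simp)]
    simp only [pvAltGo, List.findIdx?_nil, hi, if_neg hi]
    rw [pvR_of_not_mem _ (by simp)]
    match t with
    | [] => simp [pvAltGo]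
    | y :: t' =>
      show PySem.Chars.join ['/'] ((x :: y :: (t' ++ [[]])).dropLast) ++ ['/'] = _
      rw [show (x :: y :: (t' ++ [[]])) = ((x :: y :: t') ++ [[]]) from rfl, List.dropLast_concat]
  | succ n ih =>
    intro b hb i static hst hi
    by_cases hmem : '/' ∈ b
    · obtain ⟨a, b', rfl, ha⟩ := sep_decomp b hmem
      rw [splitOn_sep_append a b' ha]
      cases hf : a.findIdx? pvWild with
      | some wi =>
        simp only [pvAltGo, hf, if_neg hi]
        rw [takeWhile_nw_append_wild a b' wi hf,
          pvR_of_not_mem _ (not_mem_takeWhile _ _ ha)]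
      | none =>
        simp only [pvAltGo, hf]
        have hlen : b'.length ≤ n := by
          have := hb; simp [List.length_append] at this; omega
        rw [ih b' hlen (i + 1) (static ++ [a]) (by simp) (by omega)]
        rw [join_append_singleton a static hst,
          takeWhile_nw_append_clean a b' hf, pvR_append]
        simp
    · rw [splitOn_no_sep b hmem]
      cases hf : b.findIdx? pvWild with
      | some wi =>
        simp only [pvAltGo, hf, if_neg hi]
        rw [pvR_of_not_mem _ (not_mem_takeWhile _ _ hmem)]
      | none =>
        simp only [pvAltGo, hf]
        obtain ⟨x, t, rfl⟩ := List.exists_cons_of_ne_nil hst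
        rw [pvR_of_not_mem _ (not_mem_takeWhile _ _ hmem)]
        match t with
        | [] => simp [pvAltGo]
        | y :: t' =>
          show PySem.Chars.join ['/'] ((x :: y :: (t' ++ [b])).dropLast) ++ ['/'] = _
          rw [show (x :: y :: (t' ++ [b])) = ((x :: y :: t') ++ [b]) from rfl, List.dropLast_concat]

def pvCharsAfun (s : List Char) : List Char :=
  if '/' ∈ s.takeWhile (fun c => !pvWild c) then pvR (s.takeWhile (fun c => !pvWild c))
  else s.takeWhile (fun c => !pvWild c)

lemma altGo_main (s : List Char) :
    pvAltGo (s.splitOn '/') 0 [] = pvCharsAfun s := by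
  unfold pvCharsAfun
  by_cases hmem : '/' ∈ s
  · obtain ⟨a, b, rfl, ha⟩ := sep_decomp s hmem
    rw [splitOn_sep_append a b ha]
    cases hf : a.findIdx? pvWild with
    | some wi =>
      simp only [pvAltGo, hf, if_pos rfl]
      rw [takeWhile_nw_append_wild a b wi hf]
      rw [if_neg (not_mem_takeWhile _ _ ha)]
      exact (findIdx?_some_take pvWild a wi hf).1
    | none =>
      simp only [pvAltGo, hf]
      rw [altGo_G (b.length) b le_rfl (0 + 1) ([] ++ [a]) (by simp) (by omega)]
      rw [takeWhile_nw_append_clean a b hf]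
      rw [if_pos (by simp), pvR_append]
      simp [PySem.Chars.join_singleton]
  · rw [splitOn_no_sep s hmem]
    have hnh : '/' ∉ s.takeWhile (fun c => !pvWild c) := not_mem_takeWhile _ _ hmem
    rw [if_neg hnh]
    cases hf : s.findIdx? pvWild with
    | some wi =>
      simp only [pvAltGo, hf, if_pos rfl]
      exact (findIdx?_some_take pvWild s wi hf).1
    | none =>
      simp only [pvAltGo, hf]
      rw [findIdx?_none_takeWhile _ _ hf]
      rfl

lemma isIn_slash (h : List Char) : PySem.Chars.isIn ['/'] h = decide ('/' ∈ h) := by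
  rw [PySem.Chars.isIn, find_singleton]
  by_cases hm : '/' ∈ h <;> simp [hm]

lemma pvR_of_mem (h : List Char) (hm : '/' ∈ h) :
    pvR h = (h.reverse.dropWhile (· != '/')).tail.reverse ++ ['/'] := by
  have hne : h.reverse.dropWhile (· != '/') ≠ [] := by
    rw [Ne, List.dropWhile_eq_nil_iff]
    push Not
    exact ⟨'/', by simpa using hm, by simp⟩
  obtain ⟨hd, tl, he⟩ := List.exists_cons_of_ne_nil hne
  have hhd : hd = '/' := by
    have := List.head_dropWhile_not (· != '/') hne
    simpa [he] using this
  rw [pvR, he, hhd]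
  simp

lemma portA_chars (g : String) :
    (glob_static_prefix_py g).toList
      = pvCharsAfun (PySem.Str.replace g "\\" "/").toList := by
  simp only [glob_static_prefix_py]
  set norm := PySem.Str.replace g "\\" "/" with hnorm
  set s := norm.toList with hs
  have hcut : (["*", "?", "["].foldl (fun cut ch =>
      let idx := PySem.Str.find norm ch
      if idx ≠ -1 ∧ idx < cut then idx else cut) (PySem.Str.len norm))
      = ((s.takeWhile (fun c => !pvWild c)).length : Int) := by
    rw [← cut_eq s]
    simp only [PySem.Str.find_eq, PySem.Str.len_eq, hs]
  rw [hcut]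
  set h := s.takeWhile (fun c => !pvWild c) with hh
  have hhead : (PySem.Str.slice norm none (some ((h.length : Nat) : Int))).toList = h := by
    rw [PySem.Str.toList_slice, PySem.Chars.slice_eq_listSlice,
      PySem.List.slice_to _ (by positivity)]
    simp only [Int.toNat_natCast, hs, hh]
    exact take_length_takeWhile _ _
  have hcond : PySem.Str.isIn "/" (PySem.Str.slice norm none (some ((h.length : Nat) : Int)))
      = decide ('/' ∈ h) := by
    rw [PySem.Str.isIn_eq, hhead]
    exact isIn_slash h
  rw [pvCharsAfun]
  by_cases hm : '/' ∈ h
  · rw [if_pos (by rw [hcond]; simpa using hm)]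
    rw [String.toList_ofList, hhead, ← hh, pvR_of_mem h hm, if_pos hm]
  · rw [if_neg (by rw [hcond]; simpa using hm)]
    rw [hhead, ← hh, if_neg hm]

lemma portB_chars (g : String) :
    (glob_static_prefix_py_alt g).toList
      = pvAltGo (((PySem.Str.replace g "\\" "/").toList).splitOn '/') 0 [] := by
  simp only [glob_static_prefix_py_alt]
  rw [String.toList_ofList, splitOn_bridge]

theorem pvPortsAgree (g : String) : glob_static_prefix_py g = glob_static_prefix_py_alt g := by
  rw [← String.toList_inj, portA_chars, portB_chars, altGo_main]

-- ===== VERDICT (by name: the statement is the Claim_ definition above) =====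
theorem glob_static_prefix_py_spec : Claim_equal_glob_static_prefix_py := by
  intro g _
  unfold Spec_glob_static_prefix_py
  exact pvPortsAgree g
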